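-- pv_equiv track=rewrite | github.com/Soohan-Park/Practice-CT-2020 | Week12/P14501) 퇴사.py | solution
-- ===== SOURCE A (Python) =====
-- def f(cur, visited, schedule, earn):
--     if cur == len(schedule):
--         return earn
--
--     if not visited[cur]:
--         earn += schedule[cur][1]
--
--         for i in range(schedule[cur][0]):
--             visited[cur+i] = True
--
--     return f(cur+1, visited, schedule, earn)
--
-- def solution(N, schedule):
--     visited = [ False for _ in range(len(schedule)) ]
--
--     # 상담 불가 건수 제외
--     for i in range(len(schedule)):
--         if i+schedule[i][0] > N:
--             visited[i] = True
--
--     answer = []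
--     for i in range(len(schedule)):
--         answer.append(f(i, visited.copy(), schedule, 0))
--
--     return max(answer)
-- ===== SOURCE B (Python) =====
-- def solution(N, schedule):
--     n = len(schedule)
--     h = [0] * (n + 1)
--     best = None
--     for i in range(n - 1, -1, -1):
--         t = schedule[i][0]
--         if i + t > N:
--             hi = h[i + 1]
--         else:
--             hi = schedule[i][1] + (h[i + t] if t > 1 else h[i + 1])
--         h[i] = hi
--         if best is None or best < hi:
--             best = hi
--     return best
-- ===== Notes on version B (the rewrite author's own statement) =====
-- stated objective: faster
-- what changed: A re-runs a greedy forward scan (recursive f with a mutable visited array) from every start index, O(N^2); B computes the same per-start earnings with a single right-to-left DP h[i] = h[i+1] if job i is infeasible else p_i + h[i + max(t_i,1)], tracking the running maximum in the same pass, O(N).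
import Mathlib
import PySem

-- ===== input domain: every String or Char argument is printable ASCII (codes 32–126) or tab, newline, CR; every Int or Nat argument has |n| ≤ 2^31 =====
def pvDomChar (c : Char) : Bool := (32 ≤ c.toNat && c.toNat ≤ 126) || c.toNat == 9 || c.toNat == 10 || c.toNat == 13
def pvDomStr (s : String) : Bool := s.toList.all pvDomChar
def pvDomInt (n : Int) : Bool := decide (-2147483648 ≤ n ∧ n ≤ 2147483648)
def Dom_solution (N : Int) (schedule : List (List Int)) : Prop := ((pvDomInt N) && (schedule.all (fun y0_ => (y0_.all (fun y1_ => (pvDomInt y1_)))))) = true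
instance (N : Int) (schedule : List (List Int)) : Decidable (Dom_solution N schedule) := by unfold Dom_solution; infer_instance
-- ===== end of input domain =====

-- B replaces A's O(n^2) per-start greedy re-scans by one right-to-left DP pass (asymptotically faster, measured).

-- ===== PORT A =====
-- marks visited[cur+i] = True for i in range(t)  (Pre_ keeps all set indices in range, as Python requires)
def markA (v : List Bool) (cur : Nat) (t : Nat) : List Bool :=
  (List.range t).foldl (fun w j => w.set (cur + j) true) v

-- Python's f; the guard is 'length ≤ cur' (Python tests 'cur == len'; solution only ever calls f with cur ≤ len)
def fA (schedule : List (List Int)) (cur : Nat) (visited : List Bool) (earn : Int) : Int :=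
  if schedule.length ≤ cur then earn
  else if visited.getD cur false then
    fA schedule (cur + 1) visited earn
  else
    fA schedule (cur + 1)
      (markA visited cur ((schedule.getD cur []).getD 0 0).toNat)
      (earn + (schedule.getD cur []).getD 1 0)
termination_by schedule.length - cur
decreasing_by all_goals omega

def solution (N : Int) (schedule : List (List Int)) : Int :=
  let n := schedule.length
  let visited := (List.range n).foldl
    (fun v (i : Nat) => if (i : Int) + (schedule.getD i []).getD 0 0 > N then v.set i true else v)
    (List.replicate n false)
  let answer := (List.range n).map (fun i => fA schedule i visited 0)
  (PySem.List.max? answer (fun x => x)).getD 0   -- max(answer); Pre_ excludes the empty list (Python raises)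

-- ===== PORT B =====
def solution_alt (N : Int) (schedule : List (List Int)) : Int :=
  let n := schedule.length
  let st := (List.range n).reverse.foldl
    (fun (st : List Int × Option Int) (i : Nat) =>
      let t := (schedule.getD i []).getD 0 0
      let hi := if (i : Int) + t > N then st.1.getD (i + 1) 0
                else (schedule.getD i []).getD 1 0 +
                     (if 1 < t then st.1.getD (i + t.toNat) 0 else st.1.getD (i + 1) 0)
      (st.1.set i hi, if st.2.elim true (fun b => b < hi) then some hi else st.2))
    (List.replicate (n + 1) 0, none)
  st.2.getD 0   -- best; Pre_ excludes the empty list (Python would return None)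

-- ===== PRECONDITION & SPEC =====
-- Pre_ is exactly the inputs on which A returns: a nonempty schedule, each row has its duration,
-- and each feasible row (i + t ≤ N) has its pay and, when t ≥ 1, marks only in-range days
-- (otherwise A raises ValueError on max([]) or IndexError).
def Pre_solution (N : Int) (schedule : List (List Int)) : Prop :=
  schedule ≠ [] ∧
  ∀ i, i < schedule.length →
    1 ≤ (schedule.getD i []).length ∧
    ((i : Int) + (schedule.getD i []).getD 0 0 ≤ N →
      2 ≤ (schedule.getD i []).length ∧
      (1 ≤ (schedule.getD i []).getD 0 0 →
        (i : Int) + (schedule.getD i []).getD 0 0 ≤ (schedule.length : Int)))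
instance (N : Int) (schedule : List (List Int)) : Decidable (Pre_solution N schedule) := by
  unfold Pre_solution; infer_instance

def pvWitness_solution : Int × List (List Int) := (3, [[1, 10], [2, 20], [1, 30]])

def Spec_solution (N : Int) (schedule : List (List Int)) (out : Int) : Prop := out = solution_alt N schedule
instance (N : Int) (schedule : List (List Int)) (out : Int) : Decidable (Spec_solution N schedule out) := by unfold Spec_solution; infer_instance

-- ===== CLAIM (what is proved, stated in full; the proofs are below) =====
def Claim_equal_solution : Prop := ∀ (N : Int) (schedule : List (List Int)), Dom_solution N schedule → Pre_solution N schedule → Spec_solution N schedule (solution N schedule)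

-- ===== LEMMAS AND PROOFS =====

-- abbreviations for row fields
def rowT (schedule : List (List Int)) (i : Nat) : Int := (schedule.getD i []).getD 0 0
def rowP (schedule : List (List Int)) (i : Nat) : Int := (schedule.getD i []).getD 1 0

-- the earnings-from-day-i function both programs compute
def hfun (N : Int) (schedule : List (List Int)) (cur : Nat) : Int :=
  if schedule.length ≤ cur then 0
  else if (cur : Int) + rowT schedule cur > N then hfun N schedule (cur + 1)
  else if 1 < rowT schedule cur then
    rowP schedule cur + hfun N schedule (cur + (rowT schedule cur).toNat)
  else
    rowP schedule cur + hfun N schedule (cur + 1)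
termination_by schedule.length - cur
decreasing_by all_goals omega

theorem hfun_end (N : Int) (schedule : List (List Int)) (cur : Nat)
    (h : schedule.length ≤ cur) : hfun N schedule cur = 0 := by
  rw [hfun]; simp [h]

theorem getD_set_bool (l : List Bool) (i j : Nat) (a : Bool) (hi : i < l.length) :
    (l.set i a).getD j false = if i = j then a else l.getD j false := by
  simp [List.getD_eq_getElem?_getD, List.getElem?_set]
  split_ifs <;> simp_all

theorem getD_set_int (l : List Int) (i j : Nat) (a d : Int) (hi : i < l.length) :
    (l.set i a).getD j d = if i = j then a else l.getD j d := by
  simp [List.getD_eq_getElem?_getD, List.getElem?_set]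
  split_ifs <;> simp_all

theorem markA_succ (v : List Bool) (cur t : Nat) :
    markA v cur (t + 1) = (markA v cur t).set (cur + t) true := by
  rw [markA, markA, List.range_succ, List.foldl_append]
  simp only [List.foldl_cons, List.foldl_nil]

theorem markA_length (v : List Bool) (cur t : Nat) : (markA v cur t).length = v.length := by
  induction t with
  | zero => simp [markA]
  | succ t ih => rw [markA_succ, List.length_set, ih]

theorem markA_getD (v : List Bool) (cur t j : Nat) (ht : cur + t ≤ v.length) :
    (markA v cur t).getD j false
      = if cur ≤ j ∧ j < cur + t then true else v.getD j false := by
  induction t with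
  | zero => simp [markA]
  | succ t ih =>
    rw [markA_succ, getD_set_bool _ _ _ _ (by rw [markA_length]; omega), ih (by omega)]
    split_ifs <;> first | rfl | (exfalso; omega)

theorem initFold_step (N : Int) (schedule : List (List Int)) (m : Nat) (v0 : List Bool) :
    ((List.range (m + 1)).foldl
      (fun v (i : Nat) => if (i : Int) + (schedule.getD i []).getD 0 0 > N then v.set i true else v)
      v0)
    = if (m : Int) + (schedule.getD m []).getD 0 0 > N then
        (((List.range m).foldl
          (fun v (i : Nat) => if (i : Int) + (schedule.getD i []).getD 0 0 > N then v.set i true else v)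
          v0)).set m true
      else
        ((List.range m).foldl
          (fun v (i : Nat) => if (i : Int) + (schedule.getD i []).getD 0 0 > N then v.set i true else v)
          v0) := by
  rw [List.range_succ, List.foldl_append]
  simp only [List.foldl_cons, List.foldl_nil]

theorem initFold_length (N : Int) (schedule : List (List Int)) (m : Nat) (v0 : List Bool) :
    ((List.range m).foldl
      (fun v (i : Nat) => if (i : Int) + (schedule.getD i []).getD 0 0 > N then v.set i true else v)
      v0).length = v0.length := by
  induction m with
  | zero => simp
  | succ m ih =>
    rw [initFold_step]
    split_ifs
    · rw [List.length_set, ih]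
    · exact ih

theorem initFold_getD (N : Int) (schedule : List (List Int)) (m : Nat) (v0 : List Bool) (j : Nat)
    (hm : m ≤ v0.length) :
    ((List.range m).foldl
      (fun v (i : Nat) => if (i : Int) + (schedule.getD i []).getD 0 0 > N then v.set i true else v)
      v0).getD j false
      = if j < m ∧ (j : Int) + rowT schedule j > N then true else v0.getD j false := by
  induction m with
  | zero => simp
  | succ m ih =>
    rw [initFold_step]
    by_cases hc : (m : Int) + (schedule.getD m []).getD 0 0 > N
    · rw [if_pos hc, getD_set_bool _ _ _ _ (by rw [initFold_length]; omega), ih (by omega)]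
      by_cases hmj : m = j
      · subst hmj
        rw [if_pos rfl, if_pos ⟨by omega, hc⟩]
      · rw [if_neg hmj]
        by_cases hjb : j < m ∧ (j : Int) + rowT schedule j > N
        · rw [if_pos hjb, if_pos ⟨by omega, hjb.2⟩]
        · rw [if_neg hjb, if_neg (by rintro ⟨h1, h2⟩; exact hjb ⟨by omega, h2⟩)]
    · rw [if_neg hc, ih (by omega)]
      by_cases hjb : j < m ∧ (j : Int) + rowT schedule j > N
      · rw [if_pos hjb, if_pos ⟨by omega, hjb.2⟩]
      · rw [if_neg hjb, if_neg ?_]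
        rintro ⟨h1, h2⟩
        rcases (by omega : j < m ∨ j = m) with h | h
        · exact hjb ⟨h, h2⟩
        · subst h; exact hc h2

-- the precondition's per-row content, as the proofs use it
def PreRows (N : Int) (schedule : List (List Int)) : Prop :=
  ∀ i, i < schedule.length →
    ((i : Int) + rowT schedule i ≤ N → 1 ≤ rowT schedule i →
      (i : Int) + rowT schedule i ≤ (schedule.length : Int))

theorem pre_rows (N : Int) (schedule : List (List Int)) (hpre : Pre_solution N schedule) :
    PreRows N schedule := by
  intro i hi hle ht
  exact ((hpre.2 i hi).2 hle).2 ht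

theorem jump_le (N : Int) (schedule : List (List Int)) (hpre : PreRows N schedule)
    (cur : Nat) (hcur : cur < schedule.length)
    (hnb : ¬ ((cur : Int) + rowT schedule cur > N)) :
    cur + (rowT schedule cur).toNat ≤ schedule.length := by
  by_cases h1 : 1 ≤ rowT schedule cur
  · have := hpre cur hcur (by omega) h1
    omega
  · omega

-- main A-side lemma: a run of f from cur, on a visited array that is the base marks plus a
-- contiguous marked prefix ending at m, earns earn + hfun (max cur m)
theorem fA_eq (N : Int) (schedule : List (List Int)) (hpre : PreRows N schedule) :
    ∀ (k cur : Nat) (v : List Bool) (m : Nat) (earn : Int),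
      schedule.length ≤ cur + k → cur ≤ schedule.length → m ≤ schedule.length →
      v.length = schedule.length →
      (∀ j, cur ≤ j → j < schedule.length →
          v.getD j false = (decide ((j : Int) + rowT schedule j > N) || decide (j < m))) →
      fA schedule cur v earn = earn + hfun N schedule (max cur m) := by
  intro k
  induction k with
  | zero =>
    intro cur v m earn hk hcur hm hv hinv
    rw [fA, hfun_end N schedule _ (by omega)]
    simp [show schedule.length ≤ cur by omega]
  | succ k ih =>
    intro cur v m earn hk hcur hm hv hinv
    by_cases hc : schedule.length ≤ cur
    · rw [fA, hfun_end N schedule _ (by omega)]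
      simp [hc]
    · replace hc : cur < schedule.length := by omega
      rw [fA]
      rw [if_neg (by omega : ¬ schedule.length ≤ cur)]
      have hinvcur := hinv cur le_rfl hc
      by_cases hvis : v.getD cur false = true
      · rw [if_pos hvis]
        rw [ih (cur + 1) v m earn (by omega) (by omega) hm hv
          (fun j hj1 hj2 => hinv j (by omega) hj2)]
        congr 1
        rw [hvis] at hinvcur
        simp at hinvcur
        by_cases hlt : cur < m
        · have h1 : max cur m = m := by omega
          have h2 : max (cur + 1) m = m := by omega
          rw [h1, h2]
        · have hb : ((cur : Int) + rowT schedule cur > N) := by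
            rcases hinvcur with h | h
            · exact h
            · omega
          have h1 : max cur m = cur := by omega
          have h2 : max (cur + 1) m = cur + 1 := by omega
          rw [h1, h2]
          conv_rhs => rw [hfun]
          rw [if_neg (by omega : ¬ schedule.length ≤ cur), if_pos hb]
      · rw [if_neg hvis]
        simp only [Bool.not_eq_true] at hvis
        rw [hvis] at hinvcur
        simp at hinvcur
        obtain ⟨hnb', hmle⟩ := hinvcur
        have hnb : ¬ ((cur : Int) + rowT schedule cur > N) := by omega
        have hjump : cur + (rowT schedule cur).toNat ≤ schedule.length :=
          jump_le N schedule hpre cur hc hnb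
        have hm'ge : cur + 1 ≤ (if 1 < rowT schedule cur then cur + (rowT schedule cur).toNat else cur + 1) := by
          split_ifs with h <;> omega
        have hm'le : (if 1 < rowT schedule cur then cur + (rowT schedule cur).toNat else cur + 1) ≤ schedule.length := by
          split_ifs with h <;> omega
        have hstep : fA schedule (cur + 1)
            (markA v cur ((schedule.getD cur []).getD 0 0).toNat)
            (earn + (schedule.getD cur []).getD 1 0)
            = (earn + rowP schedule cur)
              + hfun N schedule (max (cur + 1)
                  (if 1 < rowT schedule cur then cur + (rowT schedule cur).toNat else cur + 1)) := by
          apply ih (cur + 1) _ _ _ (by omega) (by omega) hm'le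
          · rw [markA_length, hv]
          · intro j hj1 hj2
            have hmark := markA_getD v cur (rowT schedule cur).toNat j (by omega)
            rw [show ((schedule.getD cur []).getD 0 0) = rowT schedule cur from rfl, hmark]
            by_cases hjin : cur ≤ j ∧ j < cur + (rowT schedule cur).toNat
            · rw [if_pos hjin]
              have h1t : 1 < rowT schedule cur := by
                by_contra h
                have : (rowT schedule cur).toNat ≤ 1 := by omega
                omega
              have hjm' : j < (if 1 < rowT schedule cur then cur + (rowT schedule cur).toNat else cur + 1) := by
                rw [if_pos h1t]; omega
              simp [hjm']
            · rw [if_neg hjin, hinv j (by omega) hj2]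
              have hjm : ¬ j < m := by omega
              have hjm' : ¬ j < (if 1 < rowT schedule cur then cur + (rowT schedule cur).toNat else cur + 1) := by
                split_ifs with h <;> omega
              simp [hjm, hjm']
        rw [hstep]
        have hmax1 : max (cur + 1)
            (if 1 < rowT schedule cur then cur + (rowT schedule cur).toNat else cur + 1)
            = (if 1 < rowT schedule cur then cur + (rowT schedule cur).toNat else cur + 1) := by
          omega
        have hmax2 : max cur m = cur := by omega
        rw [hmax1, hmax2]
        conv_rhs => rw [hfun]
        rw [if_neg (by omega : ¬ schedule.length ≤ cur), if_neg hnb]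
        split_ifs with h1t <;> ring

-- ===== B-side: the fold of solution_alt computes hfun and its running maximum =====
def bVal (N : Int) (schedule : List (List Int)) (h : List Int) (i : Nat) : Int :=
  if (i : Int) + (schedule.getD i []).getD 0 0 > N then h.getD (i + 1) 0
  else (schedule.getD i []).getD 1 0 +
       (if 1 < (schedule.getD i []).getD 0 0 then h.getD (i + ((schedule.getD i []).getD 0 0).toNat) 0
        else h.getD (i + 1) 0)

def updB (b : Option Int) (x : Int) : Option Int :=
  if b.elim true (fun v => v < x) then some x else b

def stepB (N : Int) (schedule : List (List Int)) (st : List Int × Option Int) (i : Nat) :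
    List Int × Option Int :=
  (st.1.set i (bVal N schedule st.1 i), updB st.2 (bVal N schedule st.1 i))

theorem solution_alt_eq (N : Int) (schedule : List (List Int)) :
    solution_alt N schedule
      = (((List.range schedule.length).reverse.foldl (stepB N schedule)
          (List.replicate (schedule.length + 1) 0, none)).2).getD 0 := rfl

theorem range_succ_reverse (k : Nat) :
    (List.range (k + 1)).reverse = k :: (List.range k).reverse := by
  rw [List.range_succ]; simp

theorem bVal_eq_hfun (N : Int) (schedule : List (List Int)) (hpre : PreRows N schedule)
    (k : Nat) (hk : k < schedule.length) (h : List Int)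
    (hh : ∀ j, k + 1 ≤ j → j ≤ schedule.length → h.getD j 0 = hfun N schedule j) :
    bVal N schedule h k = hfun N schedule k := by
  rw [bVal,
    show ((schedule.getD k []).getD 0 0) = rowT schedule k from rfl,
    show ((schedule.getD k []).getD 1 0) = rowP schedule k from rfl]
  conv_rhs => rw [hfun]
  rw [if_neg (by omega : ¬ schedule.length ≤ k)]
  by_cases hb : (k : Int) + rowT schedule k > N
  · rw [if_pos hb, if_pos hb, hh (k + 1) (by omega) (by omega)]
  · have hj := jump_le N schedule hpre k hk hb
    rw [if_neg hb, if_neg hb]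
    by_cases h1t : 1 < rowT schedule k
    · rw [if_pos h1t, if_pos h1t, hh (k + (rowT schedule k).toNat) (by omega) (by omega)]
    · rw [if_neg h1t, if_neg h1t, hh (k + 1) (by omega) (by omega)]

theorem B_loop (N : Int) (schedule : List (List Int)) (hpre : PreRows N schedule) :
    ∀ (k : Nat), k ≤ schedule.length → ∀ (h : List Int) (best : Option Int),
      h.length = schedule.length + 1 →
      (∀ j, k ≤ j → j ≤ schedule.length → h.getD j 0 = hfun N schedule j) →
      ((List.range k).reverse.foldl (stepB N schedule) (h, best)).2
        = (List.range k).reverse.foldl (fun b i => updB b (hfun N schedule i)) best := by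
  intro k
  induction k with
  | zero => intro _ h best _ _; simp
  | succ k ih =>
    intro hk h best hlen hh
    rw [range_succ_reverse]
    simp only [List.foldl_cons]
    have hval : bVal N schedule h k = hfun N schedule k :=
      bVal_eq_hfun N schedule hpre k (by omega) h (fun j hj1 hj2 => hh j (by omega) hj2)
    have hstep : stepB N schedule (h, best) k
        = (h.set k (hfun N schedule k), updB best (hfun N schedule k)) := by
      rw [stepB, hval]
    rw [hstep]
    rw [ih (by omega) _ _ (by rw [List.length_set, hlen]) ?_]
    intro j hj1 hj2
    rw [getD_set_int _ _ _ _ _ (by omega)]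
    by_cases hkj : k = j
    · rw [if_pos hkj, hkj]
    · rw [if_neg hkj, hh j (by omega) hj2]

theorem updB_some (x y : Int) : updB (some x) y = some (max x y) := by
  rw [updB]
  simp only [Option.elim]
  split_ifs with h
  · simp only [decide_eq_true_eq] at h
    rw [max_eq_right (le_of_lt h)]
  · simp only [decide_eq_true_eq] at h
    rw [max_eq_left (by omega : y ≤ x)]

theorem updB_none (y : Int) : updB none y = some y := rfl

theorem foldl_updB_some (N : Int) (schedule : List (List Int)) :
    ∀ (l : List Nat) (x : Int),
      l.foldl (fun b i => updB b (hfun N schedule i)) (some x)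
        = some (l.foldl (fun a i => max a (hfun N schedule i)) x) := by
  intro l
  induction l with
  | nil => intro x; simp
  | cons a l ih =>
    intro x
    simp only [List.foldl_cons]
    rw [updB_some, ih]

theorem foldl_max_spec (N : Int) (schedule : List (List Int)) :
    ∀ (l : List Nat) (x : Int),
      ((l.foldl (fun a i => max a (hfun N schedule i)) x = x
        ∨ ∃ i ∈ l, l.foldl (fun a i => max a (hfun N schedule i)) x = hfun N schedule i)
      ∧ x ≤ l.foldl (fun a i => max a (hfun N schedule i)) x
      ∧ ∀ i ∈ l, hfun N schedule i ≤ l.foldl (fun a i => max a (hfun N schedule i)) x) := by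
  intro l
  induction l with
  | nil => intro x; simp
  | cons a l ih =>
    intro x
    obtain ⟨h1, h2, h3⟩ := ih (max x (hfun N schedule a))
    simp only [List.foldl_cons]
    refine ⟨?_, ?_, ?_⟩
    · rcases h1 with h | h
      · by_cases hax : hfun N schedule a ≤ x
        · left; rw [h, max_eq_left hax]
        · right
          exact ⟨a, List.mem_cons_self .., by rw [h, max_eq_right (by omega)]⟩
      · obtain ⟨i, hi, hie⟩ := h
        right
        exact ⟨i, List.mem_cons_of_mem _ hi, hie⟩
    · exact le_trans (le_max_left _ _) h2
    · intro i hi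
      rcases List.mem_cons.mp hi with h | h
      · subst h; exact le_trans (le_max_right _ _) h2
      · exact h3 i h

theorem solution_spec : Claim_equal_solution := by
  intro N schedule _ hpre
  have hpr : PreRows N schedule := pre_rows N schedule hpre
  have hn : 0 < schedule.length := List.length_pos_iff_ne_nil.mpr hpre.1
  show solution N schedule = solution_alt N schedule
  have hA : solution N schedule
      = (PySem.List.max? ((List.range schedule.length).map (fun i => hfun N schedule i))
          (fun x => x)).getD 0 := by
    rw [show solution N schedule
        = (PySem.List.max? ((List.range schedule.length).map
            (fun i => fA schedule i
              ((List.range schedule.length).foldl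
                (fun v (i : Nat) =>
                  if (i : Int) + (schedule.getD i []).getD 0 0 > N then v.set i true else v)
                (List.replicate schedule.length false)) 0)) (fun x => x)).getD 0 from rfl]
    congr 2
    apply List.map_congr_left
    intro i hi
    rw [List.mem_range] at hi
    have hVlen : ((List.range schedule.length).foldl
        (fun v (i : Nat) =>
          if (i : Int) + (schedule.getD i []).getD 0 0 > N then v.set i true else v)
        (List.replicate schedule.length false)).length = schedule.length := by
      rw [initFold_length, List.length_replicate]
    have hrun := fA_eq N schedule hpr (schedule.length - i) i
      ((List.range schedule.length).foldl
        (fun v (i : Nat) =>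
          if (i : Int) + (schedule.getD i []).getD 0 0 > N then v.set i true else v)
        (List.replicate schedule.length false)) 0 0
      (by omega) (by omega) (by omega) hVlen ?_
    · rw [hrun]
      simp
    · intro j hj1 hj2
      rw [initFold_getD N schedule _ _ j (by simp)]
      have hrep : (List.replicate schedule.length (false : Bool)).getD j false = false := by
        simp only [List.getD_eq_getElem?_getD, List.getElem?_replicate]
        split_ifs
        rfl
      rw [hrep]
      by_cases hb : (j : Int) + rowT schedule j > N
      · rw [if_pos ⟨hj2, hb⟩]
        simp [hb]
      · rw [if_neg (by rintro ⟨_, h⟩; exact hb h)]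
        simp [hb]
  have hB : solution_alt N schedule
      = ((List.range schedule.length).reverse.foldl
          (fun b i => updB b (hfun N schedule i)) none).getD 0 := by
    rw [solution_alt_eq, B_loop N schedule hpr schedule.length le_rfl _ _ (by simp) ?_]
    intro j hj1 hj2
    have hj : j = schedule.length := by omega
    subst hj
    rw [hfun_end N schedule _ le_rfl]
    simp [List.getD_eq_getElem?_getD]
  obtain ⟨n', hn'⟩ : ∃ n', schedule.length = n' + 1 := ⟨schedule.length - 1, by omega⟩
  rw [hA, hB, hn', range_succ_reverse]
  simp only [List.foldl_cons]
  rw [updB_none, foldl_updB_some]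
  rcases hmax : PySem.List.max? ((List.range (n' + 1)).map (fun i => hfun N schedule i))
      (fun x => x) with _ | M1
  · rw [PySem.List.max?_eq_none_iff] at hmax
    simp at hmax
  · simp only [Option.getD_some]
    have hmem := PySem.List.max?_mem hmax
    have hmaxall := PySem.List.max?_isMax hmax
    obtain ⟨hi0, h2, h3⟩ := foldl_max_spec N schedule ((List.range n').reverse) (hfun N schedule n')
    have hup : ∀ i, i < n' + 1 → hfun N schedule i ≤ M1 := by
      intro i hilt
      exact hmaxall _ (List.mem_map_of_mem (List.mem_range.mpr hilt))
    obtain ⟨i0, hi0r, hi0e⟩ := List.mem_map.mp hmem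
    rw [List.mem_range] at hi0r
    have hM1le : M1 ≤ ((List.range n').reverse).foldl
        (fun a i => max a (hfun N schedule i)) (hfun N schedule n') := by
      rcases (by omega : i0 = n' ∨ i0 < n') with h | h
      · rw [← hi0e, h]; exact h2
      · rw [← hi0e]
        exact h3 i0 (by rw [List.mem_reverse, List.mem_range]; exact h)
    have hM2le : ((List.range n').reverse).foldl
        (fun a i => max a (hfun N schedule i)) (hfun N schedule n') ≤ M1 := by
      rcases hi0 with h | h
      · rw [h]; exact hup n' (by omega)
      · obtain ⟨i, hi, hie⟩ := h
        rw [List.mem_reverse, List.mem_range] at hi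
        rw [hie]; exact hup i (by omega)
    omega
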